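-- pv_equiv track=rewrite | github.com/hardikpnsp/advent-of-code-2021 | 19-beacon-scanner/beacon-scanner.py | transform
-- ===== SOURCE A (Python) =====
-- def transform(x, y, z, transform_type):
--     if transform_type == 0:
--         return x, y, z
--     elif transform_type == 1:
--         # 90 left rotation from z axis
--         return -y, x, z
--     elif transform_type == 2:
--         # 180 left rotation from z axis
--         return -x, -y, z
--     elif transform_type == 3:
--         # 270 left rotation from z axis
--         return y, -x, z
--     elif transform_type == 4:
--         # bring x to z and then do all 4 previous rotations
--         return transform(-z, y, x, 0)
--     elif transform_type == 5:
--         return transform(-z, y, x, 1)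
--     elif transform_type == 6:
--         return transform(-z, y, x, 2)
--     elif transform_type == 7:
--         return transform(-z, y, x, 3)
--     elif transform_type == 8:
--         # bring y to z and then do 4 rotations
--         return transform(x, -z, y, 0)
--     elif transform_type == 9:
--         return transform(x, -z, y, 1)
--     elif transform_type == 10:
--         return transform(x, -z, y, 2)
--     elif transform_type == 11:
--         return transform(x, -z, y, 3)
--     elif transform_type == 12:
--         # bring -x to z and then do 4 rotations
--         return transform(z, y, -x, 0)
--     elif transform_type == 13:
--         return transform(z, y, -x, 1)
--     elif transform_type == 14:
--         return transform(z, y, -x, 2)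
--     elif transform_type == 15:
--         return transform(z, y, -x, 3)
--     elif transform_type == 16:
--         # bring -y to z and then do 4 rotations
--         return transform(x, z, -y, 0)
--     elif transform_type == 17:
--         return transform(x, z, -y, 1)
--     elif transform_type == 18:
--         return transform(x, z, -y, 2)
--     elif transform_type == 19:
--         return transform(x, z, -y, 3)
--     elif transform_type == 20:
--         # bring -z to z and do 4 rotations
--         return transform(-x, y, -z, 0)
--     elif transform_type == 21:
--         return transform(-x, y, -z, 1)
--     elif transform_type == 22:
--         return transform(-x, y, -z, 2)
--     elif transform_type == 23:
--         return transform(-x, y, -z, 3)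
-- ===== SOURCE B (Python) =====
-- # 24-entry orientation table replacing A's if-chain with recursion: one lookup, no recursion.
-- _ORIENTATIONS = (
--     lambda x, y, z: (x, y, z),
--     lambda x, y, z: (-y, x, z),
--     lambda x, y, z: (-x, -y, z),
--     lambda x, y, z: (y, -x, z),
--     lambda x, y, z: (-z, y, x),
--     lambda x, y, z: (-y, -z, x),
--     lambda x, y, z: (z, -y, x),
--     lambda x, y, z: (y, z, x),
--     lambda x, y, z: (x, -z, y),
--     lambda x, y, z: (z, x, y),
--     lambda x, y, z: (-x, z, y),
--     lambda x, y, z: (-z, -x, y),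
--     lambda x, y, z: (z, y, -x),
--     lambda x, y, z: (-y, z, -x),
--     lambda x, y, z: (-z, -y, -x),
--     lambda x, y, z: (y, -z, -x),
--     lambda x, y, z: (x, z, -y),
--     lambda x, y, z: (-z, x, -y),
--     lambda x, y, z: (-x, -z, -y),
--     lambda x, y, z: (z, -x, -y),
--     lambda x, y, z: (-x, y, -z),
--     lambda x, y, z: (-y, -x, -z),
--     lambda x, y, z: (x, -y, -z),
--     lambda x, y, z: (y, x, -z),
-- )
--
-- def transform(x, y, z, transform_type):
--     if 0 <= transform_type < 24:
--         return _ORIENTATIONS[transform_type](x, y, z)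
--     return None
-- ===== Notes on version B (the rewrite author's own statement) =====
-- stated objective: simpler
-- what changed: Replaces the 24-branch if-chain with recursive self-calls by a precomputed 24-entry table of orientation maps and a single index lookup.
-- outside the precondition, e.g. on transform(1, 2, 3, 24): A returns None, B returns None; on transform(1, 2, 3, -1): A returns None, B returns None
import Mathlib
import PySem

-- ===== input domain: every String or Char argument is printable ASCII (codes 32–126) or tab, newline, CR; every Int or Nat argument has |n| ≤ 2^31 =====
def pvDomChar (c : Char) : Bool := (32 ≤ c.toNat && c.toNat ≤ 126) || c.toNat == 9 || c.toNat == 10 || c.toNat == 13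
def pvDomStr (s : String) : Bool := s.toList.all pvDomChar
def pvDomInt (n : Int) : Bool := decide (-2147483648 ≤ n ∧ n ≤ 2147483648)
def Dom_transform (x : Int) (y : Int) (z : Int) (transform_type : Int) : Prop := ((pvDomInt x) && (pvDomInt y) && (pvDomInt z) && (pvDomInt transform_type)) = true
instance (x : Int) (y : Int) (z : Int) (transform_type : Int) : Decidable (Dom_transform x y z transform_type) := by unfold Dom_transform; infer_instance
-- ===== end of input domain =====

-- ===== PORT A =====
-- B replaces A's recursive 24-branch if-chain by a precomputed orientation table and one lookup (objective: simpler).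
-- transliteration of A's if-chain; recursive calls kept (termination: transform_type shrinks)
def transform (x : Int) (y : Int) (z : Int) (transform_type : Int) : Int × Int × Int :=
  if transform_type = 0 then (x, y, z)
  else if transform_type = 1 then (-y, x, z)
  else if transform_type = 2 then (-x, -y, z)
  else if transform_type = 3 then (y, -x, z)
  else if transform_type = 4 then transform (-z) y x 0
  else if transform_type = 5 then transform (-z) y x 1
  else if transform_type = 6 then transform (-z) y x 2
  else if transform_type = 7 then transform (-z) y x 3
  else if transform_type = 8 then transform x (-z) y 0
  else if transform_type = 9 then transform x (-z) y 1
  else if transform_type = 10 then transform x (-z) y 2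
  else if transform_type = 11 then transform x (-z) y 3
  else if transform_type = 12 then transform z y (-x) 0
  else if transform_type = 13 then transform z y (-x) 1
  else if transform_type = 14 then transform z y (-x) 2
  else if transform_type = 15 then transform z y (-x) 3
  else if transform_type = 16 then transform x z (-y) 0
  else if transform_type = 17 then transform x z (-y) 1
  else if transform_type = 18 then transform x z (-y) 2
  else if transform_type = 19 then transform x z (-y) 3
  else if transform_type = 20 then transform (-x) y (-z) 0
  else if transform_type = 21 then transform (-x) y (-z) 1
  else if transform_type = 22 then transform (-x) y (-z) 2
  else if transform_type = 23 then transform (-x) y (-z) 3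
  else (0, 0, 0)  -- Python returns None here; excluded by Pre_transform
termination_by transform_type.toNat
decreasing_by all_goals simp_all


-- ===== PORT B =====
-- B: table of the 24 orientations, one index lookup
def orientTable (x : Int) (y : Int) (z : Int) : List (Int × Int × Int) :=
  [(x, y, z),
   (-y, x, z),
   (-x, -y, z),
   (y, -x, z),
   (-z, y, x),
   (-y, -z, x),
   (z, -y, x),
   (y, z, x),
   (x, -z, y),
   (z, x, y),
   (-x, z, y),
   (-z, -x, y),
   (z, y, -x),
   (-y, z, -x),
   (-z, -y, -x),
   (y, -z, -x),
   (x, z, -y),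
   (-z, x, -y),
   (-x, -z, -y),
   (z, -x, -y),
   (-x, y, -z),
   (-y, -x, -z),
   (x, -y, -z),
   (y, x, -z)]

def transform_alt (x : Int) (y : Int) (z : Int) (transform_type : Int) : Int × Int × Int :=
  if 0 ≤ transform_type ∧ transform_type < 24 then
    (PySem.List.pyGet? (orientTable x y z) transform_type).getD (0, 0, 0)
  else (0, 0, 0)  -- Python returns None here; excluded by Pre_transform


-- ===== PRECONDITION & SPEC =====
-- Pre_ excludes transform_type outside 0..23, where Python A returns None (no Int triple).
def Pre_transform (x : Int) (y : Int) (z : Int) (transform_type : Int) : Prop :=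
  0 ≤ transform_type ∧ transform_type < 24
instance (x : Int) (y : Int) (z : Int) (transform_type : Int) : Decidable (Pre_transform x y z transform_type) := by unfold Pre_transform; infer_instance

def pvWitness_transform : Int × Int × Int × Int := (1, 2, 3, 5)

def Spec_transform (x : Int) (y : Int) (z : Int) (transform_type : Int) (out : Int × Int × Int) : Prop := out = transform_alt x y z transform_type
instance (x : Int) (y : Int) (z : Int) (transform_type : Int) (out : Int × Int × Int) : Decidable (Spec_transform x y z transform_type out) := by unfold Spec_transform; infer_instance

-- ===== CLAIM (what is proved, stated in full; the proofs are below) =====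
def Claim_equal_transform : Prop := ∀ (x : Int) (y : Int) (z : Int) (transform_type : Int), Dom_transform x y z transform_type → Pre_transform x y z transform_type → Spec_transform x y z transform_type (transform x y z transform_type)

-- ===== LEMMAS AND PROOFS =====

-- ===== VERDICT (by name: the statement is the Claim_ definition above) =====
theorem transform_spec : Claim_equal_transform := by
  intro x y z t _ hp
  obtain ⟨h0, h24⟩ := hp
  unfold Spec_transform
  interval_cases t <;>
    simp [transform, transform_alt, orientTable, PySem.List.pyGet?, PySem.List.pyIdx?]
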